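-- pv_equiv track=rewrite | github.com/ChangChan203/XLA_PTIT | BaiC4.3_BoundaryEx.py | boundary_ex
-- ===== SOURCE A (Python) =====
-- def boundary_ex(f, n, fil, matrix):
--     re = [[i for i in row] for row in matrix]
--     fs = f // 2
--
--     for i in range(n):
--         for j in range(n):
--             check = True
--
--             for k in range(-fs, fs + 1):
--                 for l in range(-fs, fs + 1):
--                     if 0 <= i + k < n and 0 <= j + l < n:
--                         if fil[k + fs][l + fs] != 0 and matrix[i + k][j + l] != fil[k + fs][l + fs]:
--                             re[i][j] = 0
--                             check = False
--                     else:
--                         re[i][j] = 0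
--                         check = False
--                     if not check:
--                         break
--                 if not check:
--                     break
--     result = [[0 for i in row] for row in matrix]
--     for i in range(n):
--         for j in range(n):
--             if matrix[i][j] == re[i][j]:
--                 result[i][j] = 0
--             else:
--                 result[i][j] = 1
--     return result
-- ===== SOURCE B (Python) =====
-- def boundary_ex(f, n, fil, matrix):
--     fs = f // 2
--     size = max(2 * fs + 1, 0)
--     # nonzero filter taps within the window, collected once
--     taps = [(a, b, v)
--             for a, frow in enumerate(fil[:size])
--             for b, v in enumerate(frow[:size]) if v != 0]
--     out = []
--     for i, row in enumerate(matrix):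
--         out_row = []
--         for j, x in enumerate(row):
--             hit = 0
--             if i < n and j < n and x != 0:
--                 inside = fs <= i < n - fs and fs <= j < n - fs
--                 if not (inside and all(matrix[i - fs + a][j - fs + b] == v
--                                        for a, b, v in taps)):
--                     hit = 1
--             out_row.append(hit)
--         out.append(out_row)
--     return out
-- ===== Notes on version B (the rewrite author's own statement) =====
-- stated objective: alternative
-- what changed: B precomputes the list of nonzero filter taps once and makes a single pass over the image, deciding each output cell by one interior-window test plus a check of those taps, instead of A's mutated image copy with per-position bounds checks and early breaks followed by a second comparison pass.
import Mathlib
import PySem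

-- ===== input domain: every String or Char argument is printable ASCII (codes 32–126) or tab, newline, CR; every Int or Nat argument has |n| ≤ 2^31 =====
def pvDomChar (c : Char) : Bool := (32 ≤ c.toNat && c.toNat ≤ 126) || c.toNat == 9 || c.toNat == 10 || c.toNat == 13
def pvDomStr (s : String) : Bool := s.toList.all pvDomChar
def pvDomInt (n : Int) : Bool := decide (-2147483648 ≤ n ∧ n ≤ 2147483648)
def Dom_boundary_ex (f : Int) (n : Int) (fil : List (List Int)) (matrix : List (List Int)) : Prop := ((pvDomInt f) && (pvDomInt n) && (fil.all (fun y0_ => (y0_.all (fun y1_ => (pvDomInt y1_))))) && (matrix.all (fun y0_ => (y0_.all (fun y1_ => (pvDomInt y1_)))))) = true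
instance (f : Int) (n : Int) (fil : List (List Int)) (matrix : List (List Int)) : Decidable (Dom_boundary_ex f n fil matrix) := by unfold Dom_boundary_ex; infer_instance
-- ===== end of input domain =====

-- B collects the nonzero filter taps once and does a single pass over the image (one interior
-- test plus a tap check per pixel), instead of A's mutated copy, per-position bounds checks
-- with early breaks and second comparison pass (alternative decomposition, same asymptotic cost).

-- g[i][j] read with a default (every read is in range on the inputs Pre_ admits)
def pvGet2 (g : List (List Int)) (i j : Int) : Int :=
  PySem.List.pyGetD (PySem.List.pyGetD g i []) j 0

-- g[i][j] = v (every write is in range on the inputs Pre_ admits)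
def pvSet2 (g : List (List Int)) (i j : Int) (v : Int) : List (List Int) :=
  PySem.List.pySetD g i (PySem.List.pySetD (PySem.List.pyGetD g i []) j v)

-- ===== PORT A =====
-- inner 'for l' loop of A, entered with check = True; returning false = 'break' with re[i][j] set to 0
def pvLoopL (fs n : Int) (fil matrix : List (List Int)) (i j k : Int) :
    List Int → List (List Int) → (List (List Int) × Bool)
  | [], re => (re, true)
  | l :: rest, re =>
    if 0 ≤ i + k ∧ i + k < n ∧ 0 ≤ j + l ∧ j + l < n then
      if pvGet2 fil (k + fs) (l + fs) ≠ 0 ∧ pvGet2 matrix (i + k) (j + l) ≠ pvGet2 fil (k + fs) (l + fs) then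
        (pvSet2 re i j 0, false)
      else pvLoopL fs n fil matrix i j k rest re
    else (pvSet2 re i j 0, false)

-- outer 'for k' loop of A; stops as soon as check became False
def pvLoopK (fs n : Int) (fil matrix : List (List Int)) (i j : Int) :
    List Int → List (List Int) → List (List Int)
  | [], re => re
  | k :: rest, re =>
    match pvLoopL fs n fil matrix i j k (PySem.List.pyRange (-fs) (fs + 1) 1) re with
    | (re', true) => pvLoopK fs n fil matrix i j rest re'
    | (re', false) => re'

def boundary_ex (f : Int) (n : Int) (fil : List (List Int)) (matrix : List (List Int)) : List (List Int) :=
  let re := matrix.map (fun row => row.map (fun x => x))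
  let fs := PySem.Int.floordiv f 2
  let re := (PySem.List.pyRange 0 n 1).foldl (fun re i =>
      (PySem.List.pyRange 0 n 1).foldl (fun re j =>
        pvLoopK fs n fil matrix i j (PySem.List.pyRange (-fs) (fs + 1) 1) re) re) re
  let result := matrix.map (fun row => row.map (fun _ => (0 : Int)))
  (PySem.List.pyRange 0 n 1).foldl (fun result i =>
    (PySem.List.pyRange 0 n 1).foldl (fun result j =>
      if pvGet2 matrix i j = pvGet2 re i j then pvSet2 result i j 0 else pvSet2 result i j 1) result) result

-- ===== PORT B =====
-- B's tap list: the nonzero cells (a, b, v) of the filter, truncated to the size×size window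
def pvTaps (size : Int) (fil : List (List Int)) : List (Int × Int × Int) :=
  (PySem.List.enumerate (PySem.List.slice fil none (some size)) 0).flatMap fun p =>
    (PySem.List.enumerate (PySem.List.slice p.2 none (some size)) 0).filterMap fun q =>
      if q.2 ≠ 0 then some (p.1, q.1, q.2) else none

def boundary_ex_alt (f : Int) (n : Int) (fil : List (List Int)) (matrix : List (List Int)) : List (List Int) :=
  let fs := PySem.Int.floordiv f 2
  let size := max (2 * fs + 1) 0
  let taps := pvTaps size fil
  (PySem.List.enumerate matrix 0).map fun p =>
    (PySem.List.enumerate p.2 0).map fun q =>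
      if p.1 < n ∧ q.1 < n ∧ q.2 ≠ 0 then
        (if (fs ≤ p.1 ∧ p.1 < n - fs ∧ fs ≤ q.1 ∧ q.1 < n - fs) ∧
            taps.all (fun t => pvGet2 matrix (p.1 - fs + t.1) (q.1 - fs + t.2.1) == t.2.2)
         then 0 else 1)
      else 0

-- ===== PRECONDITION & SPEC =====
-- fil has a cell at (a, b) (reading fil[a][b] does not raise)
def pvFilHas (fil : List (List Int)) (a b : Int) : Bool :=
  decide (0 ≤ a ∧ a < (fil.length : Int) ∧ 0 ≤ b ∧ b < ((PySem.List.pyGetD fil a []).length : Int))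

-- window position (k, l) of pixel (i, j) is in bounds and passes A's filter test (scan continues past it)
def pvPass (fs n : Int) (fil matrix : List (List Int)) (i j k l : Int) : Bool :=
  decide (0 ≤ i + k ∧ i + k < n ∧ 0 ≤ j + l ∧ j + l < n) && pvFilHas fil (k + fs) (l + fs) &&
  (pvGet2 fil (k + fs) (l + fs) == 0 || pvGet2 matrix (i + k) (j + l) == pvGet2 fil (k + fs) (l + fs))

-- the scan of pixel (i, j) reaches (all lexicographically earlier window positions pass) an
-- in-bounds window position whose filter cell is missing — exactly where A raises IndexError
def pvScanRaises (fs n : Int) (fil matrix : List (List Int)) (i j : Int) : Bool :=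
  (PySem.List.pyRange (-fs) (fs + 1) 1).any fun k =>
    (PySem.List.pyRange (-fs) (fs + 1) 1).any fun l =>
      ((PySem.List.pyRange (-fs) (fs + 1) 1).all fun k' =>
        (PySem.List.pyRange (-fs) (fs + 1) 1).all fun l' =>
          !(decide (k' < k ∨ (k' = k ∧ l' < l))) || pvPass fs n fil matrix i j k' l') &&
      decide (0 ≤ i + k ∧ i + k < n ∧ 0 ≤ j + l ∧ j + l < n) && !(pvFilHas fil (k + fs) (l + fs))

-- Pre_ holds exactly where the Python A returns (no IndexError): for n > 0 the matrix must be at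
-- least n×n (A's comparison pass reads every matrix[i][j], i,j < n) and no pixel's window scan may
-- reach a missing filter cell.  When fs < 0 the window is empty and when fs ≥ n every pixel's very
-- first window position is out of bounds, so in both cases no filter cell is ever read.
def Pre_boundary_ex (f : Int) (n : Int) (fil : List (List Int)) (matrix : List (List Int)) : Prop :=
  n ≤ 0 ∨ (n ≤ (matrix.length : Int) ∧ (∀ row ∈ matrix.take n.toNat, n ≤ (row.length : Int)) ∧
    (PySem.Int.floordiv f 2 < 0 ∨ n ≤ PySem.Int.floordiv f 2 ∨
      ∀ i ∈ PySem.List.pyRange 0 n 1, ∀ j ∈ PySem.List.pyRange 0 n 1,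
        pvScanRaises (PySem.Int.floordiv f 2) n fil matrix i j = false))
instance (f : Int) (n : Int) (fil : List (List Int)) (matrix : List (List Int)) : Decidable (Pre_boundary_ex f n fil matrix) := by unfold Pre_boundary_ex; infer_instance

def pvWitness_boundary_ex : Int × Int × List (List Int) × List (List Int) :=
  (3, 2, [[1, 1, 1], [1, 0, 1], [1, 1, 1]], [[1, 1], [1, 0]])

def Spec_boundary_ex (f : Int) (n : Int) (fil : List (List Int)) (matrix : List (List Int)) (out : List (List Int)) : Prop := out = boundary_ex_alt f n fil matrix
instance (f : Int) (n : Int) (fil : List (List Int)) (matrix : List (List Int)) (out : List (List Int)) : Decidable (Spec_boundary_ex f n fil matrix out) := by unfold Spec_boundary_ex; infer_instance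

-- ===== CLAIM (what is proved, stated in full; the proofs are below) =====
def Claim_equal_boundary_ex : Prop := ∀ (f : Int) (n : Int) (fil : List (List Int)) (matrix : List (List Int)), Dom_boundary_ex f n fil matrix → Pre_boundary_ex f n fil matrix → Spec_boundary_ex f n fil matrix (boundary_ex f n fil matrix)

-- ===== LEMMAS AND PROOFS =====

-- A's per-pixel window test as one boolean: every window position in bounds and compatible
def pvMatched (fs n : Int) (fil matrix : List (List Int)) (i j : Int) : Bool :=
  (PySem.List.pyRange (-fs) (fs + 1) 1).all fun k =>
    (PySem.List.pyRange (-fs) (fs + 1) 1).all fun l =>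
      decide (0 ≤ i + k ∧ i + k < n ∧ 0 ≤ j + l ∧ j + l < n) &&
      (pvGet2 fil (k + fs) (l + fs) == 0 || pvGet2 matrix (i + k) (j + l) == pvGet2 fil (k + fs) (l + fs))

-- the (a,b) cell of a grid, none when out of shape
def pvCell? (g : List (List Int)) (a b : Nat) : Option Int := (g[a]?).bind (fun r => r[b]?)

theorem pvCell?_set2 (g : List (List Int)) (i j : Int) (v : Int) (hi : 0 ≤ i) (hj : 0 ≤ j)
    (a b : Nat) :
    pvCell? (pvSet2 g i j v) a b =
      if (a : Int) = i ∧ (b : Int) = j then (pvCell? g a b).map (fun _ => v) else pvCell? g a b := by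
  lift i to ℕ using hi with I
  lift j to ℕ using hj with J
  simp only [pvSet2, PySem.List.pySetD_natCast, PySem.List.pyGetD_natCast, pvCell?,
    Nat.cast_inj]
  by_cases hA : a = I
  · subst hA
    by_cases hL : a < g.length
    · rw [List.getElem?_set_self (by omega)]
      rw [List.getD_eq_getElem?_getD, List.getElem?_eq_getElem hL]
      simp only [Option.getD_some, Option.bind_some]
      by_cases hB : b = J
      · subst hB
        simp only [List.getElem?_set_self']
        rfl
      · have : (g[a].set J v)[b]? = g[a][b]? := List.getElem?_set_ne (by omega)
        simp [this, hB]
    · rw [List.set_eq_of_length_le (by omega)]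
      have : g[a]? = none := List.getElem?_eq_none (by omega)
      simp [this]
  · have : (g.set I (List.set (g[I]?.getD []) J v))[a]? = g[a]? := List.getElem?_set_ne (by omega)
    simp [this, hA]

theorem pvLoopL_spec (fs n : Int) (fil matrix : List (List Int)) (i j k : Int)
    (ls : List Int) (re : List (List Int)) :
    pvLoopL fs n fil matrix i j k ls re =
      (if (ls.all fun l =>
            decide (0 ≤ i + k ∧ i + k < n ∧ 0 ≤ j + l ∧ j + l < n) &&
            (pvGet2 fil (k + fs) (l + fs) == 0 ||
              pvGet2 matrix (i + k) (j + l) == pvGet2 fil (k + fs) (l + fs)))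
       then re else pvSet2 re i j 0,
       ls.all fun l =>
            decide (0 ≤ i + k ∧ i + k < n ∧ 0 ≤ j + l ∧ j + l < n) &&
            (pvGet2 fil (k + fs) (l + fs) == 0 ||
              pvGet2 matrix (i + k) (j + l) == pvGet2 fil (k + fs) (l + fs))) := by
  induction ls with
  | nil => simp [pvLoopL]
  | cons l rest ih =>
    rw [pvLoopL]
    by_cases hb : 0 ≤ i + k ∧ i + k < n ∧ 0 ≤ j + l ∧ j + l < n
    · by_cases hm : pvGet2 fil (k + fs) (l + fs) ≠ 0 ∧
          pvGet2 matrix (i + k) (j + l) ≠ pvGet2 fil (k + fs) (l + fs)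
      · have hv : (decide (0 ≤ i + k ∧ i + k < n ∧ 0 ≤ j + l ∧ j + l < n) &&
            (pvGet2 fil (k + fs) (l + fs) == 0 ||
              pvGet2 matrix (i + k) (j + l) == pvGet2 fil (k + fs) (l + fs))) = false := by
          simp [hb, hm.1, hm.2]
        rw [if_pos hb, if_pos hm, List.all_cons, hv]
        simp
      · have hv : (decide (0 ≤ i + k ∧ i + k < n ∧ 0 ≤ j + l ∧ j + l < n) &&
            (pvGet2 fil (k + fs) (l + fs) == 0 ||
              pvGet2 matrix (i + k) (j + l) == pvGet2 fil (k + fs) (l + fs))) = true := by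
          rcases not_and_or.mp hm with hz | hz
          · simp [hb, not_not.mp hz]
          · simp [hb, not_not.mp hz]
        rw [if_pos hb, if_neg hm, ih, List.all_cons, hv, Bool.true_and]
    · have hv : (decide (0 ≤ i + k ∧ i + k < n ∧ 0 ≤ j + l ∧ j + l < n) &&
            (pvGet2 fil (k + fs) (l + fs) == 0 ||
              pvGet2 matrix (i + k) (j + l) == pvGet2 fil (k + fs) (l + fs))) = false := by
          simp [hb]
      rw [if_neg hb, List.all_cons, hv]
      simp

theorem pvLoopK_spec (fs n : Int) (fil matrix : List (List Int)) (i j : Int)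
    (ks : List Int) (re : List (List Int)) :
    pvLoopK fs n fil matrix i j ks re =
      (if (ks.all fun k => (PySem.List.pyRange (-fs) (fs + 1) 1).all fun l =>
            decide (0 ≤ i + k ∧ i + k < n ∧ 0 ≤ j + l ∧ j + l < n) &&
            (pvGet2 fil (k + fs) (l + fs) == 0 ||
              pvGet2 matrix (i + k) (j + l) == pvGet2 fil (k + fs) (l + fs)))
       then re else pvSet2 re i j 0) := by
  induction ks generalizing re with
  | nil => simp [pvLoopK]
  | cons k rest ih =>
    rw [pvLoopK, pvLoopL_spec]
    rcases hP : ((PySem.List.pyRange (-fs) (fs + 1) 1).all fun l =>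
            decide (0 ≤ i + k ∧ i + k < n ∧ 0 ≤ j + l ∧ j + l < n) &&
            (pvGet2 fil (k + fs) (l + fs) == 0 ||
              pvGet2 matrix (i + k) (j + l) == pvGet2 fil (k + fs) (l + fs))) with _ | _
    · rw [List.all_cons, hP]
      simp
    · rw [List.all_cons, hP, if_pos rfl, Bool.true_and]
      exact ih re

theorem pvFoldJ_cell (upd : Int → Int → Option Int) (i : Int) (hi : 0 ≤ i) (L : List Int)
    (hL : ∀ x ∈ L, 0 ≤ x) (g : List (List Int)) (a b : Nat) :
    pvCell? (L.foldl (fun g j => match upd i j with | none => g | some v => pvSet2 g i j v) g) a b =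
      if (a : Int) = i ∧ (b : Int) ∈ L then
        (match upd i (b : Int) with
         | none => pvCell? g a b
         | some v => (pvCell? g a b).map (fun _ => v))
      else pvCell? g a b := by
  induction L generalizing g with
  | nil => simp
  | cons j rest ih =>
    rw [List.foldl_cons]
    rw [ih (fun x hx => hL x (List.mem_cons_of_mem _ hx))]
    have hj : 0 ≤ j := hL j List.mem_cons_self
    have hg' : pvCell? (match upd i j with | none => g | some v => pvSet2 g i j v) a b =
        if (a : Int) = i ∧ (b : Int) = j then
          (match upd i (b : Int) with
           | none => pvCell? g a b
           | some v => (pvCell? g a b).map (fun _ => v))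
        else pvCell? g a b := by
      by_cases hc : (a : Int) = i ∧ (b : Int) = j
      · rw [if_pos hc, ← hc.2]
        cases hu : upd i (b : Int) with
        | none => simp
        | some v =>
          show pvCell? (pvSet2 g i (b : Int) v) a b = (pvCell? g a b).map (fun _ => v)
          rw [pvCell?_set2 g i (b : Int) v hi (by positivity)]
          simp [hc.1]
      · rw [if_neg hc]
        cases hu : upd i j with
        | none => rfl
        | some v =>
          rw [pvCell?_set2 g i j v hi hj]
          rw [if_neg]
          intro h
          exact hc ⟨h.1, h.2⟩
    by_cases hai : (a : Int) = i
    · by_cases hbr : (b : Int) ∈ rest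
      · rw [if_pos ⟨hai, hbr⟩, if_pos ⟨hai, List.mem_cons_of_mem _ hbr⟩, hg']
        by_cases hbj : (b : Int) = j
        · rw [if_pos ⟨hai, hbj⟩]
          cases hu : upd i (b : Int) with
          | none => rfl
          | some v => simp only [Option.map_map]; congr 1
        · rw [if_neg (by intro h; exact hbj h.2)]
      · rw [if_neg (by intro h; exact hbr h.2), hg']
        by_cases hbj : (b : Int) = j
        · rw [if_pos ⟨hai, hbj⟩, if_pos ⟨hai, by rw [hbj]; exact List.mem_cons_self⟩]
        · rw [if_neg (by intro h; exact hbj h.2),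
              if_neg (by intro h; rcases List.mem_cons.mp h.2 with h2 | h2; exact hbj h2; exact hbr h2)]
    · rw [if_neg (by intro h; exact hai h.1), if_neg (by intro h; exact hai h.1), hg',
        if_neg (by intro h; exact hai h.1)]

theorem pvFold2_cell (upd : Int → Int → Option Int) (Lo Li : List Int)
    (hLo : ∀ x ∈ Lo, 0 ≤ x) (hLi : ∀ x ∈ Li, 0 ≤ x) (g : List (List Int)) (a b : Nat) :
    pvCell? (Lo.foldl (fun g i =>
        Li.foldl (fun g j => match upd i j with | none => g | some v => pvSet2 g i j v) g) g) a b =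
      if (a : Int) ∈ Lo ∧ (b : Int) ∈ Li then
        (match upd (a : Int) (b : Int) with
         | none => pvCell? g a b
         | some v => (pvCell? g a b).map (fun _ => v))
      else pvCell? g a b := by
  induction Lo generalizing g with
  | nil => simp
  | cons i rest ih =>
    rw [List.foldl_cons, ih (fun x hx => hLo x (List.mem_cons_of_mem _ hx))]
    have hi : 0 ≤ i := hLo i List.mem_cons_self
    have hg' := pvFoldJ_cell upd i hi Li hLi g a b
    by_cases hbi : (b : Int) ∈ Li
    · by_cases har : (a : Int) ∈ rest
      · rw [if_pos ⟨har, hbi⟩, if_pos ⟨List.mem_cons_of_mem _ har, hbi⟩, hg']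
        by_cases hai : (a : Int) = i
        · rw [if_pos ⟨hai, hbi⟩, ← hai]
          cases hu : upd (a : Int) (b : Int) with
          | none => rfl
          | some v => simp only [Option.map_map]; congr 1
        · rw [if_neg (by intro h; exact hai h.1)]
      · rw [if_neg (by intro h; exact har h.1), hg']
        by_cases hai : (a : Int) = i
        · rw [if_pos ⟨hai, hbi⟩, if_pos ⟨by rw [hai]; exact List.mem_cons_self, hbi⟩, ← hai]
        · rw [if_neg (by intro h; exact hai h.1),
              if_neg (by intro h; rcases List.mem_cons.mp h.1 with h2 | h2; exact hai h2; exact har h2)]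
    · rw [if_neg (by intro h; exact hbi h.2), if_neg (by intro h; exact hbi h.2), hg',
        if_neg (by intro h; exact hbi h.2)]

theorem pvGet2_cell (g : List (List Int)) (a b : Nat) :
    pvGet2 g (a : Int) (b : Int) = (pvCell? g a b).getD 0 := by
  simp only [pvGet2, pvCell?, PySem.List.pyGetD_natCast, List.getD_eq_getElem?_getD]
  cases g[a]? with
  | none => simp
  | some r => simp

theorem pvCell?_mapGrid (fn : Int → Int) (g : List (List Int)) (a b : Nat) :
    pvCell? (g.map (fun row => row.map fn)) a b = (pvCell? g a b).map fn := by
  simp only [pvCell?, List.getElem?_map]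
  cases g[a]? with
  | none => simp
  | some r => simp

theorem pvGrid_ext (g1 g2 : List (List Int)) (hlen : g1.length = g2.length)
    (h : ∀ a b, pvCell? g1 a b = pvCell? g2 a b) : g1 = g2 := by
  apply List.ext_getElem?
  intro a
  cases h1 : g1[a]? with
  | none =>
    have h2 : g2[a]? = none := by
      have := List.getElem?_eq_none_iff.mp h1
      exact List.getElem?_eq_none_iff.mpr (hlen ▸ this)
    rw [h2]
  | some r1 =>
    have ha : a < g2.length := by
      obtain ⟨hlt, -⟩ := List.getElem?_eq_some_iff.mp h1
      omega
    obtain ⟨r2, h2⟩ : ∃ r2, g2[a]? = some r2 := ⟨g2[a], List.getElem?_eq_getElem ha⟩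
    rw [h2]
    have hr : r1 = r2 := by
      apply List.ext_getElem?
      intro b
      have := h a b
      rw [pvCell?, pvCell?, h1, h2] at this
      simpa using this
    rw [hr]

theorem pvFoldl_length {f : List (List Int) → Int → List (List Int)}
    (h : ∀ g i, (f g i).length = g.length) :
    ∀ (L : List Int) (g : List (List Int)), (L.foldl f g).length = g.length := by
  intro L
  induction L with
  | nil => intro g; rfl
  | cons x rest ih => intro g; rw [List.foldl_cons, ih, h]

theorem pvSet2_length (g : List (List Int)) (i j : Int) (v : Int) :
    (pvSet2 g i j v).length = g.length := by
  simp [pvSet2, PySem.List.length_pySetD]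

theorem pvLoopK_matched (fs n : Int) (fil matrix : List (List Int)) (i j : Int)
    (re : List (List Int)) :
    pvLoopK fs n fil matrix i j (PySem.List.pyRange (-fs) (fs + 1) 1) re =
      (match (if pvMatched fs n fil matrix i j then none else some (0 : Int)) with
       | none => re
       | some v => pvSet2 re i j v) := by
  rw [pvLoopK_spec]
  cases hm : pvMatched fs n fil matrix i j with
  | true => rw [if_pos (by exact hm)]; rfl
  | false => rw [if_neg (by rw [show ((PySem.List.pyRange (-fs) (fs + 1) 1).all fun k => (PySem.List.pyRange (-fs) (fs + 1) 1).all fun l =>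
      decide (0 ≤ i + k ∧ i + k < n ∧ 0 ≤ j + l ∧ j + l < n) &&
      (pvGet2 fil (k + fs) (l + fs) == 0 || pvGet2 matrix (i + k) (j + l) == pvGet2 fil (k + fs) (l + fs))) = pvMatched fs n fil matrix i j from rfl, hm]; simp)]
             rfl

-- membership in B's tap list
theorem mem_pvTaps (size : Int) (hs : 0 ≤ size) (fil : List (List Int)) (t : Int × Int × Int) :
    t ∈ pvTaps size fil ↔
      ∃ (a b : Nat), (a : Int) < size ∧ (b : Int) < size ∧
        ∃ (h1 : a < fil.length) (h2 : b < fil[a].length),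
          fil[a][b] ≠ 0 ∧ t = ((a : Int), (b : Int), fil[a][b]) := by
  unfold pvTaps
  rw [PySem.List.slice_to _ hs]
  constructor
  · intro ht
    obtain ⟨p, hp, hin⟩ := List.mem_flatMap.mp ht
    obtain ⟨a, hlt, rfl⟩ := (PySem.List.mem_enumerate_iff _ _ _).mp hp
    have halen : a < fil.length := by simp [List.length_take] at hlt; omega
    have hasz : (a : Int) < size := by simp [List.length_take] at hlt; omega
    have hrow : (List.take size.toNat fil)[a] = fil[a] := List.getElem_take
    simp only [hrow, zero_add] at hin
    rw [PySem.List.slice_to _ hs] at hin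
    obtain ⟨q, hq, hif⟩ := List.mem_filterMap.mp hin
    obtain ⟨b, hbl, rfl⟩ := (PySem.List.mem_enumerate_iff _ _ _).mp hq
    have hblen : b < fil[a].length := by simp [List.length_take] at hbl; omega
    have hbsz : (b : Int) < size := by simp [List.length_take] at hbl; omega
    have hcol : (List.take size.toNat fil[a])[b] = fil[a][b] := List.getElem_take
    simp only [hcol, zero_add] at hif
    by_cases hz : fil[a][b] ≠ 0
    · rw [if_pos (by simpa using hz)] at hif
      exact ⟨a, b, hasz, hbsz, halen, hblen, hz, by simpa using hif.symm⟩
    · rw [if_neg (by simpa using hz)] at hif; cases hif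
  · rintro ⟨a, b, hasz, hbsz, h1, h2, hz, rfl⟩
    apply List.mem_flatMap.mpr
    refine ⟨((a : Int), fil[a]), ?_, ?_⟩
    · apply (PySem.List.mem_enumerate_iff _ _ _).mpr
      refine ⟨a, by simp [List.length_take]; omega, ?_⟩
      rw [List.getElem_take]
      simp
    · apply List.mem_filterMap.mpr
      refine ⟨((b : Int), fil[a][b]), ?_, ?_⟩
      · rw [PySem.List.slice_to _ hs]
        apply (PySem.List.mem_enumerate_iff _ _ _).mpr
        refine ⟨b, by simp [List.length_take]; omega, ?_⟩
        rw [List.getElem_take]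
        simp
      · simp [hz]

theorem pvGet2_natCast (g : List (List Int)) (a b : Nat) :
    pvGet2 g (a : Int) (b : Int) = (g.getD a []).getD b 0 := by
  simp [pvGet2]

-- A's window test for pixel (a,b) < n equals B's interior test plus tap check
theorem pvMatched_eq_taps (fs n : Int) (fil matrix : List (List Int)) (a b : Nat)
    (ha : (a : Int) < n) (hb : (b : Int) < n) :
    (decide (fs ≤ (a : Int) ∧ (a : Int) < n - fs ∧ fs ≤ (b : Int) ∧ (b : Int) < n - fs) &&
      (pvTaps (max (2 * fs + 1) 0) fil).all
        (fun t => pvGet2 matrix ((a : Int) - fs + t.1) ((b : Int) - fs + t.2.1) == t.2.2))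
    = pvMatched fs n fil matrix a b := by
  have hWmem : ∀ k : Int, k ∈ PySem.List.pyRange (-fs) (fs + 1) 1 ↔ -fs ≤ k ∧ k < fs + 1 :=
    fun k => PySem.List.mem_pyRange_one
  have hbool : ∀ x y : Bool, (x = true ↔ y = true) → x = y := by decide
  apply hbool
  rw [Bool.and_eq_true, decide_eq_true_iff, List.all_eq_true]
  unfold pvMatched
  rw [List.all_eq_true]
  by_cases hfs : fs < 0
  · -- empty window, empty tap list
    have hW : PySem.List.pyRange (-fs) (fs + 1) 1 = [] := by
      apply List.eq_nil_of_length_eq_zero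
      rw [PySem.List.length_pyRange_one]
      omega
    have hT : pvTaps (max (2 * fs + 1) 0) fil = [] := by
      have : (max (2 * fs + 1) 0) = 0 := by omega
      rw [this]
      unfold pvTaps
      rw [PySem.List.slice_to _ le_rfl]
      simp [PySem.List.enumerate_nil]
    rw [hW, hT]
    constructor
    · intro _ k hk; cases hk
    · intro _
      refine ⟨⟨by omega, by omega, by omega, by omega⟩, fun t ht => by cases ht⟩
  · rw [not_lt] at hfs
    have hsz : (0 : Int) ≤ max (2 * fs + 1) 0 := le_max_right _ _
    have hszv : max (2 * fs + 1) 0 = 2 * fs + 1 := by omega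
    constructor
    · rintro ⟨hin, htaps⟩ k hk
      rw [List.all_eq_true]
      intro l hl
      rw [hWmem] at hk hl
      rw [Bool.and_eq_true, decide_eq_true_iff, Bool.or_eq_true, beq_iff_eq, beq_iff_eq]
      refine ⟨⟨by omega, by omega, by omega, by omega⟩, ?_⟩
      -- filter cell (k+fs, l+fs)
      obtain ⟨A, hAe⟩ : ∃ A : Nat, (A : Int) = k + fs := ⟨(k + fs).toNat, by omega⟩
      obtain ⟨B, hBe⟩ : ∃ B : Nat, (B : Int) = l + fs := ⟨(l + fs).toNat, by omega⟩
      rw [← hAe, ← hBe, pvGet2_natCast]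
      by_cases hA : A < fil.length
      · rw [List.getD_eq_getElem _ _ hA]
        by_cases hB : B < fil[A].length
        · rw [List.getD_eq_getElem _ _ hB]
          by_cases hz : fil[A][B] = 0
          · exact Or.inl hz
          · right
            have hmem : ((A : Int), (B : Int), fil[A][B]) ∈ pvTaps (max (2 * fs + 1) 0) fil := by
              rw [mem_pvTaps _ hsz]
              exact ⟨A, B, by omega, by omega, hA, hB, hz, rfl⟩
            have := htaps _ hmem
            rw [beq_iff_eq] at this
            rw [show ((a:Int) + k) = (a:Int) - fs + (A:Int) by omega,
                show ((b:Int) + l) = (b:Int) - fs + (B:Int) by omega]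
            simpa using this
        · rw [List.getD_eq_default _ _ ((by omega : fil[A].length ≤ B))]
          exact Or.inl rfl
      · rw [List.getD_eq_default _ _ ((by omega : fil.length ≤ A))]
        simp
    · intro h
      have hget : ∀ k l : Int, -fs ≤ k → k < fs + 1 → -fs ≤ l → l < fs + 1 →
          (0 ≤ (a:Int) + k ∧ (a:Int) + k < n ∧ 0 ≤ (b:Int) + l ∧ (b:Int) + l < n) ∧
          (pvGet2 fil (k + fs) (l + fs) = 0 ∨
            pvGet2 matrix ((a:Int) + k) ((b:Int) + l) = pvGet2 fil (k + fs) (l + fs)) := by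
        intro k l h1 h2 h3 h4
        have := h k (hWmem k |>.mpr ⟨h1, h2⟩)
        rw [List.all_eq_true] at this
        have := this l (hWmem l |>.mpr ⟨h3, h4⟩)
        rw [Bool.and_eq_true, decide_eq_true_iff, Bool.or_eq_true, beq_iff_eq, beq_iff_eq] at this
        exact this
      constructor
      · obtain ⟨⟨p1, p2, p3, p4⟩, -⟩ := hget (-fs) (-fs) (by omega) (by omega) (by omega) (by omega)
        obtain ⟨⟨q1, q2, q3, q4⟩, -⟩ := hget fs fs (by omega) (by omega) (by omega) (by omega)
        exact ⟨by omega, by omega, by omega, by omega⟩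
      · intro t ht
        rw [mem_pvTaps _ hsz] at ht
        obtain ⟨A, B, hAs, hBs, h1, h2, hz, rfl⟩ := ht
        have hc := hget ((A : Int) - fs) ((B : Int) - fs) (by omega) (by omega) (by omega) (by omega)
        have hAeq : (A : Int) - fs + fs = (A : Int) := by ring
        have hBeq : (B : Int) - fs + fs = (B : Int) := by ring
        rw [hAeq, hBeq, pvGet2_natCast, List.getD_eq_getElem _ _ h1, List.getD_eq_getElem _ _ h2] at hc
        rcases hc.2 with hc2 | hc2
        · exact absurd hc2 hz
        · rw [beq_iff_eq]
          show pvGet2 matrix ((a:Int) - fs + (A:Int)) ((b:Int) - fs + (B:Int)) = fil[A][B]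
          rw [show (a:Int) - fs + (A:Int) = (a:Int) + ((A:Int) - fs) by ring,
              show (b:Int) - fs + (B:Int) = (b:Int) + ((B:Int) - fs) by ring]
          exact hc2

-- cell (a,b) of B's output grid
theorem pvAltCell (fs n : Int) (fil matrix : List (List Int)) (a b : Nat) :
    pvCell? (List.map (fun (p : Int × List Int) =>
        List.map (fun (q : Int × Int) =>
          if p.1 < n ∧ q.1 < n ∧ q.2 ≠ 0 then
            (if (fs ≤ p.1 ∧ p.1 < n - fs ∧ fs ≤ q.1 ∧ q.1 < n - fs) ∧
                (pvTaps (max (2 * fs + 1) 0) fil).all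
                  (fun t => pvGet2 matrix (p.1 - fs + t.1) (q.1 - fs + t.2.1) == t.2.2)
             then (0 : Int) else 1)
          else 0)
          (PySem.List.enumerate p.2 0)) (PySem.List.enumerate matrix 0)) a b
      = (pvCell? matrix a b).map (fun x =>
          if (a : Int) < n ∧ (b : Int) < n ∧ x ≠ 0 ∧ ¬ pvMatched fs n fil matrix (a : Int) (b : Int) = true
          then (1 : Int) else 0) := by
  simp only [pvCell?, List.getElem?_map, PySem.List.getElem?_enumerate]
  cases hma : matrix[a]? with
  | none => simp
  | some row =>
    simp only [Option.map_some, Option.bind_some, List.getElem?_map, PySem.List.getElem?_enumerate,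
      zero_add]
    cases hrb : row[b]? with
    | none => simp
    | some x =>
      simp only [Option.map_some]
      congr 1
      by_cases h1 : (a : Int) < n
      · by_cases h2 : (b : Int) < n
        · have hiff : ((fs ≤ (a:Int) ∧ (a:Int) < n - fs ∧ fs ≤ (b:Int) ∧ (b:Int) < n - fs) ∧
              ((pvTaps (max (2 * fs + 1) 0) fil).all
                (fun t => pvGet2 matrix ((a:Int) - fs + t.1) ((b:Int) - fs + t.2.1) == t.2.2)) = true)
              ↔ pvMatched fs n fil matrix (a:Int) (b:Int) = true := by
            rw [← pvMatched_eq_taps fs n fil matrix a b h1 h2, Bool.and_eq_true, decide_eq_true_iff]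
          simp only [hiff]
          by_cases hx : x ≠ 0
          · rw [if_pos ⟨h1, h2, hx⟩]
            cases hm : pvMatched fs n fil matrix (a : Int) (b : Int) with
            | true => simp [h1, h2, hx]
            | false => simp [h1, h2, hx]
          · simp [h1, h2, hx]
        · simp [h2]
      · simp [h1]

theorem boundary_ex_eq_alt (f n : Int) (fil matrix : List (List Int)) :
    boundary_ex f n fil matrix = boundary_ex_alt f n fil matrix := by
  have hnn : ∀ x ∈ PySem.List.pyRange 0 n 1, (0:Int) ≤ x :=
    fun x hx => (PySem.List.mem_pyRange_one.mp hx).1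
  simp only [boundary_ex, boundary_ex_alt]
  rw [show matrix.map (fun row => row.map (fun x => x)) = matrix by simp]
  set fs := PySem.Int.floordiv f 2 with hfs
  set L := PySem.List.pyRange 0 n 1 with hL
  set RE := L.foldl (fun re i => L.foldl (fun re j =>
      pvLoopK fs n fil matrix i j (PySem.List.pyRange (-fs) (fs + 1) 1) re) re) matrix with hRE
  have hre : ∀ a b : Nat, pvCell? RE a b =
      if (a : Int) < n ∧ (b : Int) < n ∧ pvMatched fs n fil matrix (a : Int) (b : Int) = false
      then (pvCell? matrix a b).map (fun _ => (0 : Int)) else pvCell? matrix a b := by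
    intro a b
    rw [hRE, show (fun (re : List (List Int)) (i : Int) => L.foldl (fun re j =>
          pvLoopK fs n fil matrix i j (PySem.List.pyRange (-fs) (fs + 1) 1) re) re)
        = (fun g i => L.foldl (fun g j =>
            match (if pvMatched fs n fil matrix i j then none else some (0 : Int)) with
            | none => g
            | some v => pvSet2 g i j v) g) from by
      funext g i
      congr 1
      funext g j
      exact pvLoopK_matched fs n fil matrix i j g]
    rw [hL, pvFold2_cell _ _ _ hnn hnn]
    by_cases h1 : (a : Int) < n <;> by_cases h2 : (b : Int) < n <;>
      cases hm : pvMatched fs n fil matrix (a : Int) (b : Int) <;>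
        simp [hL, PySem.List.mem_pyRange_one, h1, h2]
  have hrelen : RE.length = matrix.length := by
    rw [hRE]
    apply pvFoldl_length
    intro g i
    apply pvFoldl_length
    intro g' j
    rw [pvLoopK_matched]
    cases (if pvMatched fs n fil matrix i j then none else some (0 : Int)) with
    | none => rfl
    | some v => exact pvSet2_length g' i j v
  have hinlen : ∀ (g' : List (List Int)) (i j : Int),
      ((if pvGet2 matrix i j = pvGet2 RE i j then pvSet2 g' i j 0 else pvSet2 g' i j 1)).length = g'.length := by
    intro g' i j
    by_cases hc : pvGet2 matrix i j = pvGet2 RE i j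
    · rw [if_pos hc]; exact pvSet2_length g' i j 0
    · rw [if_neg hc]; exact pvSet2_length g' i j 1
  apply pvGrid_ext
  · rw [pvFoldl_length (fun g i => pvFoldl_length (hinlen · i) L g) L]
    simp [PySem.List.length_enumerate]
  · intro a b
    rw [show (fun (result : List (List Int)) (i : Int) => L.foldl (fun result j =>
          if pvGet2 matrix i j = pvGet2 RE i j then pvSet2 result i j 0 else pvSet2 result i j 1) result)
        = (fun g i => L.foldl (fun g j =>
            match (some (if pvGet2 matrix i j = pvGet2 RE i j then (0 : Int) else 1)) with
            | none => g
            | some v => pvSet2 g i j v) g) from by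
      funext g i
      congr 1
      funext g j
      by_cases hc : pvGet2 matrix i j = pvGet2 RE i j
      · simp [hc]
      · simp [hc]]
    rw [hL, pvFold2_cell (fun i j => some (if pvGet2 matrix i j = pvGet2 RE i j then (0:Int) else 1)) _ _ hnn hnn, pvAltCell fs n fil matrix a b, pvCell?_mapGrid]
    cases hx : pvCell? matrix a b with
    | none =>
      by_cases h1 : (a : Int) ∈ PySem.List.pyRange 0 n 1 ∧ (b : Int) ∈ PySem.List.pyRange 0 n 1
      · rw [if_pos h1]; simp
      · rw [if_neg h1]; simp
    | some x =>
      have hma : pvGet2 matrix (a : Int) (b : Int) = x := by rw [pvGet2_cell, hx]; rfl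
      by_cases h1 : (a : Int) < n <;> by_cases h2 : (b : Int) < n
      · rw [if_pos ⟨PySem.List.mem_pyRange_one.mpr ⟨by positivity, h1⟩,
              PySem.List.mem_pyRange_one.mpr ⟨by positivity, h2⟩⟩]
        have hrg : pvGet2 RE (a : Int) (b : Int) =
            (if pvMatched fs n fil matrix (a : Int) (b : Int) = false then 0 else x) := by
          rw [pvGet2_cell, hre a b]
          cases hm : pvMatched fs n fil matrix (a : Int) (b : Int) with
          | false => rw [if_pos ⟨h1, h2, rfl⟩]; rw [hx]; simp
          | true => rw [if_neg (by simp), hx]; simp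
        rw [hma, hrg]
        cases hm : pvMatched fs n fil matrix (a : Int) (b : Int) with
        | false =>
          rw [if_pos rfl]
          by_cases hx0 : x = 0
          · simp [hx0, h1, h2]
          · simp [hx0, h1, h2]
        | true =>
          simp [h1, h2]
      · rw [if_neg (by intro h; exact h2 (PySem.List.mem_pyRange_one.mp h.2).2)]
        simp [h2]
      · rw [if_neg (by intro h; exact h1 (PySem.List.mem_pyRange_one.mp h.1).2)]
        simp [h1]
      · rw [if_neg (by intro h; exact h1 (PySem.List.mem_pyRange_one.mp h.1).2)]
        simp [h1]

-- ===== VERDICT (by name: the statement is the Claim_ definition above) =====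
theorem boundary_ex_spec : Claim_equal_boundary_ex := by
  intro f n fil matrix _ _
  unfold Spec_boundary_ex
  exact boundary_ex_eq_alt f n fil matrix
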